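-- pv_equiv track=rewrite | github.com/ck2739046/maidata-diff | main.py | get_context_from_original
-- ===== SOURCE A (Python) =====
-- def get_context_from_original(inote_raw, segment_index, context_chars=20):
--
--     if segment_index < 0:  # 开头占位符
--         return inote_raw[:context_chars*2] if len(inote_raw) > context_chars*2 else inote_raw
--
--     segments = inote_raw.split(',')
--     if segment_index >= len(segments):
--         return ""
--
--     # 找到目标segment在原始字符串中的位置
--     current_pos = 0
--     for i in range(segment_index):
--         current_pos += len(segments[i]) + 1  # +1 for comma
--
--     # 获取目标segment
--     target_segment = segments[segment_index]
--     segment_start = current_pos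
--     segment_end = current_pos + len(target_segment)
--
--     # 获取前后context_chars个字符
--     context_start = max(0, segment_start - context_chars)
--     context_end = min(len(inote_raw), segment_end + context_chars)
--
--     context = inote_raw[context_start:context_end]
--     # 标记目标segment的位置
--     relative_start = segment_start - context_start
--     relative_end = segment_end - context_start
--
--     if relative_start >= 0 and relative_end <= len(context):
--         context = (context[:relative_start] +
--                   ">>>" + context[relative_start:relative_end] + "<<<" +
--                   context[relative_end:])
--
--     return context
-- ===== SOURCE B (Python) =====
-- def get_context_from_original(inote_raw, segment_index, context_chars=20):
--     # Locate the target segment by scanning for commas with a find cursor,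
--     # then assemble the marked context window directly from slices.
--     if segment_index < 0:
--         return inote_raw if len(inote_raw) <= context_chars * 2 else inote_raw[:context_chars * 2]
--
--     pos = -1
--     for _ in range(segment_index):
--         pos = inote_raw.find(',', pos + 1)
--         if pos == -1:
--             return ""
--     start = pos + 1
--     e = inote_raw.find(',', start)
--     end = e if e != -1 else len(inote_raw)
--
--     context_start = max(0, start - context_chars)
--     context_end = min(len(inote_raw), end + context_chars)
--     return (inote_raw[context_start:start] + ">>>" +
--             inote_raw[start:end] + "<<<" +
--             inote_raw[end:context_end])
-- ===== Notes on version B (the rewrite author's own statement) =====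
-- stated objective: alternative
-- what changed: B never materialises the split: it locates the target segment with a comma-scanning find cursor and assembles the marked context directly from slices of the original string, instead of splitting on ',', summing segment lengths, slicing a context window and re-slicing it to insert the markers. Pre_ excludes inputs with a negative context_chars on which the target segment exists, where the unmarked shrunken window A returns is an artefact of its silently failing marker-insertion guard.
-- outside the precondition, e.g. on get_context_from_original('a,b,c', 1, -1): A returns '', B returns '>>>b<<<'
import Mathlib
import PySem

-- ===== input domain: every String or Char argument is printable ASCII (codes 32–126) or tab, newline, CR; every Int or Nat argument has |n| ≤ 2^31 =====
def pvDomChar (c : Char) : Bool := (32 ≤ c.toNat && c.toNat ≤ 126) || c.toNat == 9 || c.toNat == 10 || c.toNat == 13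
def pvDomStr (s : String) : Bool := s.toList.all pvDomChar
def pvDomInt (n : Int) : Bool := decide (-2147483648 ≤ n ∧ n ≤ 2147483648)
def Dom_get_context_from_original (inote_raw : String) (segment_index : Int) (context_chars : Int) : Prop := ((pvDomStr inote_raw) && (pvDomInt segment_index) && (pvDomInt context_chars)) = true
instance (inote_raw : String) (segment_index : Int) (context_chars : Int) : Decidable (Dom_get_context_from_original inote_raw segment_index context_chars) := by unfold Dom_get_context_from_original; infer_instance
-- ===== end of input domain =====

-- B replaces split(',') by a comma-scanning find cursor and assembles the marked context
-- directly from slices of the original string (objective: alternative decomposition, same cost).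

-- ===== PORT A =====
def get_context_from_original (inote_raw : String) (segment_index : Int) (context_chars : Int) : String :=
  let s := inote_raw.toList
  if segment_index < 0 then
    if (s.length : Int) > context_chars * 2 then String.ofList (PySem.List.slice s none (some (context_chars * 2))) else inote_raw
  else
    let segments := PySem.Chars.splitOn s [',']
    if segment_index ≥ (segments.length : Int) then ""
    else
      let current_pos : Int :=
        (PySem.List.pyRange 0 segment_index 1).foldl
          (fun acc i => acc + ((PySem.List.pyGetD segments i []).length : Int) + 1) 0
      let target_segment := PySem.List.pyGetD segments segment_index []
      let segment_start := current_pos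
      let segment_end := current_pos + (target_segment.length : Int)
      let context_start := max 0 (segment_start - context_chars)
      let context_end := min (s.length : Int) (segment_end + context_chars)
      let context := PySem.List.slice s (some context_start) (some context_end)
      let relative_start := segment_start - context_start
      let relative_end := segment_end - context_start
      if relative_start ≥ 0 ∧ relative_end ≤ (context.length : Int) then
        String.ofList (PySem.List.slice context none (some relative_start) ++ ">>>".toList ++
          PySem.List.slice context (some relative_start) (some relative_end) ++ "<<<".toList ++
          PySem.List.slice context (some relative_end) none)
      else String.ofList context

-- ===== PORT B =====
-- the 'for _ in range(segment_index): pos = inote_raw.find(',', pos+1); if pos == -1: return ""' loop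
def pvFindLoop (s : List Char) : Nat → Int → Option Int
  | 0, pos => some pos
  | Nat.succ k, pos =>
    let p := PySem.Chars.findFrom s [','] (pos + 1) none
    if p = -1 then none else pvFindLoop s k p

def get_context_from_original_alt (inote_raw : String) (segment_index : Int) (context_chars : Int) : String :=
  let s := inote_raw.toList
  if segment_index < 0 then
    if (s.length : Int) ≤ context_chars * 2 then inote_raw
    else String.ofList (PySem.List.slice s none (some (context_chars * 2)))
  else
    match pvFindLoop s segment_index.toNat (-1) with
    | none => ""
    | some pos =>
      let start := pos + 1
      let e := PySem.Chars.findFrom s [','] start none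
      let stop := if e = -1 then (s.length : Int) else e
      let context_start := max 0 (start - context_chars)
      let context_end := min (s.length : Int) (stop + context_chars)
      String.ofList (PySem.List.slice s (some context_start) (some start) ++ ">>>".toList ++
        PySem.List.slice s (some start) (some stop) ++ "<<<".toList ++
        PySem.List.slice s (some stop) (some context_end))

-- ===== PRECONDITION & SPEC =====
-- Pre_ excludes inputs with a negative context_chars on which the target segment exists (A still
-- returns there): a negative context width is a nonsensical count, and the unmarked shrunken window
-- A returns there — its marker-insertion guard silently fails — is an artefact nobody would specify.
def Pre_get_context_from_original (inote_raw : String) (segment_index : Int) (context_chars : Int) : Prop := 0 ≤ context_chars ∨ segment_index < 0 ∨ ((inote_raw.toList.count ',' : Int) < segment_index)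
instance (inote_raw : String) (segment_index : Int) (context_chars : Int) : Decidable (Pre_get_context_from_original inote_raw segment_index context_chars) := by unfold Pre_get_context_from_original; infer_instance
def pvWitness_get_context_from_original : String × Int × Int := ("hello,world,foo", 1, 3)

def Spec_get_context_from_original (inote_raw : String) (segment_index : Int) (context_chars : Int) (out : String) : Prop := out = get_context_from_original_alt inote_raw segment_index context_chars
instance (inote_raw : String) (segment_index : Int) (context_chars : Int) (out : String) : Decidable (Spec_get_context_from_original inote_raw segment_index context_chars out) := by unfold Spec_get_context_from_original; infer_instance

-- ===== CLAIM (what is proved, stated in full; the proofs are below) =====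
def Claim_equal_get_context_from_original : Prop := ∀ (inote_raw : String) (segment_index : Int) (context_chars : Int), Dom_get_context_from_original inote_raw segment_index context_chars → Pre_get_context_from_original inote_raw segment_index context_chars → Spec_get_context_from_original inote_raw segment_index context_chars (get_context_from_original inote_raw segment_index context_chars)

-- ===== LEMMAS AND PROOFS =====

-- Python's str.split(',') is List.splitOnP (· == ',') on the char list
theorem pvGo_single (fuel : Nat) : ∀ (l cur : List Char) (acc : List (List Char)),
    l.length < fuel →
    PySem.Chars.splitOn.go [','] fuel l cur acc =
      acc.reverse ++ (List.splitOnP (fun x => x == ',') l).modifyHead (cur.reverse ++ ·) := by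
  induction fuel with
  | zero => intro l cur acc h; omega
  | succ fuel ih =>
    intro l cur acc h
    cases l with
    | nil =>
      simp [PySem.Chars.splitOn.go, List.splitOnP_nil]
    | cons x rest =>
      by_cases hx : x = ','
      · subst hx
        have : (([','].isPrefixOf (',' :: rest)) : Bool) = true := by
          simp [List.isPrefixOf]
        rw [PySem.Chars.splitOn.go]
        simp only [this, if_pos, List.length_cons, List.length_nil, List.drop_succ_cons, List.drop_zero]
        rw [ih rest [] (cur.reverse :: acc) (by simpa using Nat.lt_of_succ_lt_succ h)]
        simp [List.splitOnP_cons]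
        exact congrFun List.modifyHead_id _
      · have hpre : (([','].isPrefixOf (x :: rest)) : Bool) = false := by
          simp [List.isPrefixOf]; exact fun hh => (hx hh.symm).elim
        rw [PySem.Chars.splitOn.go]
        simp only [hpre, Bool.false_eq_true, if_neg, not_false_iff]
        rw [ih rest (x :: cur) acc (by simpa using Nat.lt_of_succ_lt_succ h)]
        rw [List.splitOnP_cons]
        have hx2 : ((x == ',') : Bool) = false := by simpa using hx
        simp only [hx2, Bool.false_eq_true, if_neg, not_false_iff]
        rcases hsp : List.splitOnP (fun x => x == ',') rest with _ | ⟨a, l'⟩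
        · exact absurd hsp (List.splitOnP_ne_nil _ _)
        · simp [List.modifyHead]

theorem pvSplitOn_eq (s : List Char) :
    PySem.Chars.splitOn s [','] = List.splitOnP (fun x => x == ',') s := by
  unfold PySem.Chars.splitOn
  rw [pvGo_single (s.length + 1) s [] [] (by omega)]
  rcases hsp : List.splitOnP (fun x => x == ',') s with _ | ⟨a, l'⟩
  · exact absurd hsp (List.splitOnP_ne_nil _ _)
  · simp [List.modifyHead]

-- first-occurrence characterisation of find for a single-char needle
theorem pvSingleton_prefix (c : Char) (u : List Char) : [c] <+: u ↔ u.head? = some c := by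
  cases u with
  | nil => simp
  | cons x v => simp [List.cons_prefix_cons]; exact eq_comm

theorem pvFind_mem (t : List Char) (h : (',' : Char) ∈ t) :
    0 ≤ PySem.Chars.find t [','] ∧
    ((PySem.Chars.find t [',']).toNat < t.length ∧
     t[((PySem.Chars.find t [',']).toNat)]? = some ',' ∧
     ∀ i < ((PySem.Chars.find t [',']).toNat), t[i]? ≠ some ',') := by
  have h0 : 0 ≤ PySem.Chars.find t [','] := by
    rw [PySem.Chars.find_nonneg_iff]
    exact (List.singleton_infix_iff _ _).mpr h
  obtain ⟨hpre, hmin⟩ := PySem.Chars.find_spec h0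
  rw [pvSingleton_prefix, List.head?_drop] at hpre
  refine ⟨h0, ?_, hpre, fun i hi hc => ?_⟩
  · by_contra hlen
    rw [List.getElem?_eq_none (by omega)] at hpre
    simp at hpre
  · exact hmin i hi ((pvSingleton_prefix _ _).mpr (by rwa [List.head?_drop]))

theorem pvSplit_no_comma (t : List Char) (h : (',' : Char) ∉ t) :
    List.splitOnP (fun x => x == ',') t = [t] := by
  induction t with
  | nil => simp [List.splitOnP_nil]
  | cons x rest ih =>
    have hx : ((x == ',') : Bool) = false := by
      simp; rintro rfl; exact h (List.mem_cons_self)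
    rw [List.splitOnP_cons, if_neg (by simp [hx])]
    rw [ih (fun hm => h (List.mem_cons_of_mem _ hm))]
    rfl

theorem pvSplit_head (t : List Char) (j : Nat) (hj : t[j]? = some ',')
    (hmin : ∀ i < j, t[i]? ≠ some ',') :
    List.splitOnP (fun x => x == ',') t =
      t.take j :: List.splitOnP (fun x => x == ',') (t.drop (j + 1)) := by
  induction j generalizing t with
  | zero =>
    cases t with
    | nil => simp at hj
    | cons x rest =>
      simp at hj
      simp [List.splitOnP_cons, hj]
  | succ j ih =>
    cases t with
    | nil => simp at hj
    | cons x rest =>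
      have hx : x ≠ ',' := by
        have := hmin 0 (Nat.succ_pos j)
        simpa using this
      rw [List.splitOnP_cons, if_neg (by simp [hx])]
      rw [ih rest (by simpa using hj) (fun i hi => by simpa using hmin (i + 1) (by omega))]
      simp [List.modifyHead]

-- prefix length of the first N segments (+1 per comma)
def pvPreLen : Nat → List (List Char) → Nat
  | 0, _ => 0
  | _ + 1, [] => 0
  | n + 1, a :: l => a.length + 1 + pvPreLen n l

theorem pvPreLen_snoc (N : Nat) : ∀ (segs : List (List Char)), N < segs.length →
    pvPreLen (N + 1) segs = pvPreLen N segs + (PySem.List.pyGetD segs (N : Int) []).length + 1 := by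
  induction N with
  | zero =>
    intro segs hlen
    cases segs with
    | nil => simp at hlen
    | cons a l =>
      show a.length + 1 + 0 = 0 + (PySem.List.pyGetD (a :: l) ((0:Nat) : Int) []).length + 1
      rw [PySem.List.pyGetD_natCast]
      simp
  | succ N ih =>
    intro segs hlen
    cases segs with
    | nil => simp at hlen
    | cons a l =>
      simp only [pvPreLen]
      rw [ih l (by simpa using Nat.lt_of_succ_lt_succ hlen)]
      have : PySem.List.pyGetD (a :: l) ((N + 1 : Nat) : Int) [] = PySem.List.pyGetD l (N : Int) [] := by
        rw [PySem.List.pyGetD_natCast, PySem.List.pyGetD_natCast]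
        simp [List.getD]
      rw [this]
      omega

-- the master invariant: the find-cursor loop lands one before the start of segment N,
-- and the remaining segments are the split of the remaining suffix
theorem pvMaster (s : List Char) : ∀ (N : Nat) (off : Nat), off ≤ s.length →
    (N < (List.splitOnP (fun x => x == ',') (s.drop off)).length →
      pvFindLoop s N ((off : Int) - 1) =
        some ((off : Int) + (pvPreLen N (List.splitOnP (fun x => x == ',') (s.drop off)) : Int) - 1)
      ∧ off + pvPreLen N (List.splitOnP (fun x => x == ',') (s.drop off)) ≤ s.length
      ∧ (List.splitOnP (fun x => x == ',') (s.drop off)).drop N =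
          List.splitOnP (fun x => x == ',') (s.drop (off + pvPreLen N (List.splitOnP (fun x => x == ',') (s.drop off)))))
    ∧ ((List.splitOnP (fun x => x == ',') (s.drop off)).length ≤ N →
        pvFindLoop s N ((off : Int) - 1) = none) := by
  intro N
  induction N with
  | zero =>
    intro off hoff
    constructor
    · intro _
      refine ⟨by simp [pvFindLoop, pvPreLen], by simpa [pvPreLen] using hoff, by simp [pvPreLen]⟩
    · intro hlen
      have := List.splitOnP_ne_nil (fun x => x == ',') (s.drop off)
      have : 0 < (List.splitOnP (fun x => x == ',') (s.drop off)).length := List.length_pos_of_ne_nil this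
      omega
  | succ N ih =>
    intro off hoff
    have hstep : pvFindLoop s (N + 1) ((off : Int) - 1) =
        (if PySem.Chars.findFrom s [','] (off : Int) none = -1 then none
         else pvFindLoop s N (PySem.Chars.findFrom s [','] (off : Int) none)) := by
      show (if PySem.Chars.findFrom s [','] ((off : Int) - 1 + 1) none = -1 then none
         else pvFindLoop s N (PySem.Chars.findFrom s [','] ((off : Int) - 1 + 1) none)) = _
      norm_num
    by_cases hc : (',' : Char) ∈ s.drop off
    · obtain ⟨h0, hjlt, hj, hmin⟩ := pvFind_mem (s.drop off) hc
      set jn := (PySem.Chars.find (s.drop off) [',']).toNat with hjn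
      have hfind : PySem.Chars.find (s.drop off) [','] = (jn : Int) := by omega
      have hff : PySem.Chars.findFrom s [','] (off : Int) none = (off : Int) + (jn : Int) := by
        rw [PySem.Chars.findFrom_natCast s [','] off hoff, hfind]
        rw [if_neg (by omega)]
      have hlen_u : (s.drop off).length = s.length - off := by simp
      have hoff' : off + jn + 1 ≤ s.length := by omega
      have hdrop : (s.drop off).drop (jn + 1) = s.drop (off + jn + 1) := by
        rw [List.drop_drop]; ring_nf
      have hsplit : List.splitOnP (fun x => x == ',') (s.drop off) =
          (s.drop off).take jn :: List.splitOnP (fun x => x == ',') (s.drop (off + jn + 1)) := by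
        rw [pvSplit_head (s.drop off) jn hj hmin, hdrop]
      have htk : ((s.drop off).take jn).length = jn := by
        rw [List.length_take]; omega
      have hloop : pvFindLoop s (N + 1) ((off : Int) - 1) =
          pvFindLoop s N (((off + jn + 1 : Nat) : Int) - 1) := by
        rw [hstep, hff, if_neg (by omega)]
        congr 1
        push_cast; ring
      obtain ⟨ihlt, ihge⟩ := ih (off + jn + 1) hoff'
      constructor
      · intro hN
        rw [hsplit] at hN
        simp only [List.length_cons] at hN
        have hN' : N < (List.splitOnP (fun x => x == ',') (s.drop (off + jn + 1))).length := by omega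
        obtain ⟨e1, e2, e3⟩ := ihlt hN'
        have hpre : pvPreLen (N + 1) (List.splitOnP (fun x => x == ',') (s.drop off)) =
            jn + 1 + pvPreLen N (List.splitOnP (fun x => x == ',') (s.drop (off + jn + 1))) := by
          rw [hsplit]
          show ((s.drop off).take jn).length + 1 + _ = _
          rw [htk]
        refine ⟨?_, by omega, ?_⟩
        · rw [hloop, e1, hpre]
          congr 1
          push_cast; ring
        · rw [hsplit]
          simp only [List.drop_succ_cons]
          rw [e3]
          have hunf : pvPreLen (N + 1) ((s.drop off).take jn :: List.splitOnP (fun x => x == ',') (s.drop (off + jn + 1))) =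
              ((s.drop off).take jn).length + 1 + pvPreLen N (List.splitOnP (fun x => x == ',') (s.drop (off + jn + 1))) := rfl
          congr 2
          omega
      · intro hN
        rw [hsplit] at hN
        simp only [List.length_cons] at hN
        rw [hloop]
        exact ihge (by omega)
    · have hsplit : List.splitOnP (fun x => x == ',') (s.drop off) = [s.drop off] :=
        pvSplit_no_comma (s.drop off) hc
      have hff : PySem.Chars.findFrom s [','] (off : Int) none = -1 := by
        rw [PySem.Chars.findFrom_natCast s [','] off hoff]
        rw [if_pos]
        rw [PySem.Chars.find_eq_neg_one_iff]
        rw [List.singleton_infix_iff]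
        exact hc
      constructor
      · intro hN
        rw [hsplit] at hN
        simp at hN
      · intro _
        rw [hstep, hff, if_pos rfl]

theorem pvSplit_len (t : List Char) :
    (List.splitOnP (fun x => x == ',') t).length = t.count ',' + 1 := by
  induction t with
  | nil => simp [List.splitOnP_nil]
  | cons x rest ih =>
    rw [List.splitOnP_cons]
    by_cases hx : x = ','
    · subst hx; simp [ih]
    · have hx2 : ((x == ',') : Bool) = false := by simpa using hx
      simp only [hx2, Bool.false_eq_true, if_neg, not_false_iff]
      rw [List.length_modifyHead, ih, List.count_cons]
      simp [hx]

theorem pvFoldl_preLen (segs : List (List Char)) : ∀ (N : Nat), N ≤ segs.length →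
    (PySem.List.pyRange 0 (N : Int) 1).foldl
      (fun acc i => acc + ((PySem.List.pyGetD segs i []).length : Int) + 1) 0
      = (pvPreLen N segs : Int) := by
  intro N
  induction N with
  | zero =>
    intro _
    rw [PySem.List.pyRange_one_eq_nil (by norm_num)]
    simp [pvPreLen]
  | succ N ih =>
    intro hlen
    have : ((N + 1 : Nat) : Int) = (N : Int) + 1 := by push_cast; ring
    rw [this, PySem.List.pyRange_one_succ_right (by positivity), List.foldl_append]
    rw [ih (by omega)]
    simp only [List.foldl_cons, List.foldl_nil]
    rw [pvPreLen_snoc N segs (by omega)]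
    push_cast; ring

theorem pvSliceCtx (s : List Char) (csn st en cen : Nat)
    (h1 : csn ≤ st) (h2 : st ≤ en) (h3 : en ≤ cen) (h4 : cen ≤ s.length) :
    (((s.drop csn).take (cen - csn)).take (st - csn) = (s.drop csn).take (st - csn)) ∧
    ((((s.drop csn).take (cen - csn)).drop (st - csn)).take ((en - csn) - (st - csn)) =
        (s.drop st).take (en - st)) ∧
    (((s.drop csn).take (cen - csn)).drop (en - csn) = (s.drop en).take (cen - en)) ∧
    ((s.drop csn).take (cen - csn)).length = cen - csn := by
  refine ⟨?_, ?_, ?_, ?_⟩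
  · rw [List.take_take]
    congr 1
    omega
  · rw [List.drop_take, List.take_take, List.drop_drop]
    rw [show csn + (st - csn) = st by omega]
    congr 1
    omega
  · rw [List.drop_take, List.drop_drop]
    rw [show csn + (en - csn) = en by omega]
    congr 1
    omega
  · rw [List.length_take, List.length_drop]
    omega

theorem pvTail (s : List Char) (st en : Nat) (cc : Int) (hcc : 0 ≤ cc)
    (hse : st ≤ en) (hel : en ≤ s.length) :
    (if (st : Int) - max 0 ((st : Int) - cc) ≥ 0 ∧
        (en : Int) - max 0 ((st : Int) - cc) ≤
          ((PySem.List.slice s (some (max 0 ((st : Int) - cc))) (some (min ((s.length : Int)) ((en : Int) + cc)))).length : Int) then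
      String.ofList (
        PySem.List.slice (PySem.List.slice s (some (max 0 ((st : Int) - cc))) (some (min ((s.length : Int)) ((en : Int) + cc)))) none (some ((st : Int) - max 0 ((st : Int) - cc))) ++ ">>>".toList ++
        PySem.List.slice (PySem.List.slice s (some (max 0 ((st : Int) - cc))) (some (min ((s.length : Int)) ((en : Int) + cc)))) (some ((st : Int) - max 0 ((st : Int) - cc))) (some ((en : Int) - max 0 ((st : Int) - cc))) ++ "<<<".toList ++
        PySem.List.slice (PySem.List.slice s (some (max 0 ((st : Int) - cc))) (some (min ((s.length : Int)) ((en : Int) + cc)))) (some ((en : Int) - max 0 ((st : Int) - cc))) none)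
     else String.ofList (PySem.List.slice s (some (max 0 ((st : Int) - cc))) (some (min ((s.length : Int)) ((en : Int) + cc))))) =
    String.ofList (PySem.List.slice s (some (max 0 ((st : Int) - cc))) (some (st : Int)) ++ ">>>".toList ++
      PySem.List.slice s (some (st : Int)) (some (en : Int)) ++ "<<<".toList ++
      PySem.List.slice s (some (en : Int)) (some (min ((s.length : Int)) ((en : Int) + cc)))) := by
  obtain ⟨csn, hcsn⟩ : ∃ k : Nat, max 0 ((st : Int) - cc) = (k : Int) :=
    ⟨(max 0 ((st : Int) - cc)).toNat, by omega⟩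
  obtain ⟨cen, hcen⟩ : ∃ k : Nat, min ((s.length : Int)) ((en : Int) + cc) = (k : Int) :=
    ⟨(min ((s.length : Int)) ((en : Int) + cc)).toNat, by omega⟩
  have hb1 : csn ≤ st := by omega
  have hb3 : en ≤ cen := by omega
  have hb4 : cen ≤ s.length := by omega
  obtain ⟨q1, q2, q3, q4⟩ := pvSliceCtx s csn st en cen hb1 hse hb3 hb4
  rw [hcsn, hcen]
  rw [show ((st : Int) - (csn : Int)) = ((st - csn : Nat) : Int) by omega]
  rw [show ((en : Int) - (csn : Int)) = ((en - csn : Nat) : Int) by omega]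
  rw [PySem.List.slice_natCast, PySem.List.slice_natCast, PySem.List.slice_natCast,
    PySem.List.slice_natCast, PySem.List.slice_natCast, PySem.List.slice_to_natCast,
    PySem.List.slice_from_natCast]
  rw [if_pos (by refine ⟨by positivity, ?_⟩; rw [q4]; omega)]
  rw [q1, q2, q3]

-- ===== VERDICT (by name: the statement is the Claim_ definition above) =====
theorem get_context_from_original_spec : Claim_equal_get_context_from_original := by
  unfold Claim_equal_get_context_from_original Spec_get_context_from_original Pre_get_context_from_original
  intro inote_raw si cc _ hpre
  unfold get_context_from_original get_context_from_original_alt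
  set s := inote_raw.toList with hs
  by_cases hneg : si < 0
  · simp only [if_pos hneg]
    split_ifs <;> first | rfl | omega
  · simp only [if_neg hneg]
    set N := si.toNat with hN
    have hsi : si = (N : Int) := by omega
    have hmaster := pvMaster s N 0 (Nat.zero_le _)
    simp only [List.drop_zero] at hmaster
    rw [pvSplitOn_eq]
    set segs := List.splitOnP (fun x => x == ',') s with hsegs
    by_cases hge : si ≥ (segs.length : Int)
    · rw [if_pos hge]
      have hnone := hmaster.2 (by omega)
      rw [show ((0 : Nat) : Int) - 1 = (-1 : Int) by norm_num] at hnone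
      rw [hnone]
    · rw [if_neg hge]
      have hlt : N < segs.length := by omega
      have hcc : 0 ≤ cc := by
        rcases hpre with h | h | h
        · exact h
        · omega
        · exfalso
          have := pvSplit_len s
          rw [← hsegs] at this
          have hcnt : (s.count ',' : Int) = (inote_raw.toList.count ',' : Int) := by rw [hs]
          omega
      obtain ⟨e1, e2, e3⟩ := hmaster.1 hlt
      rw [show ((0 : Nat) : Int) - 1 = (-1 : Int) by norm_num] at e1
      set st := pvPreLen N segs with hst
      simp only [Nat.zero_add] at e2 e3
      simp only [Nat.cast_zero, zero_add] at e1
      rw [hsi]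
      rw [pvFoldl_preLen segs N (le_of_lt hlt), ← hst]
      rw [e1]
      dsimp only
      rw [show (st : Int) - 1 + 1 = (st : Int) by ring]
      simp only [PySem.List.pyGetD_natCast, List.getD]
      have hNth : segs[N]? = (List.splitOnP (fun x => x == ',') (List.drop st s))[0]? := by
        rw [← e3, List.getElem?_drop]
        simp
      by_cases hc : (',' : Char) ∈ List.drop st s
      · obtain ⟨h0, hjlt, hj, hmin⟩ := pvFind_mem (List.drop st s) hc
        set j := (PySem.Chars.find (List.drop st s) [',']).toNat with hj'
        have hfind : PySem.Chars.find (List.drop st s) [','] = (j : Int) := by omega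
        have hsplit2 : List.splitOnP (fun x => x == ',') (List.drop st s) =
            (List.drop st s).take j :: List.splitOnP (fun x => x == ',') ((List.drop st s).drop (j + 1)) :=
          pvSplit_head _ j hj hmin
        have htgt : segs[N]?.getD [] = (List.drop st s).take j := by
          rw [hNth, hsplit2]; rfl
        have hlen_u : (List.drop st s).length = s.length - st := by simp
        have htklen : ((List.drop st s).take j).length = j := by
          rw [List.length_take]; omega
        have hff : PySem.Chars.findFrom s [','] ((st : Nat) : Int) none = (st : Int) + (j : Int) := by
          rw [PySem.Chars.findFrom_natCast s [','] st e2, hfind, if_neg (by omega)]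
        rw [htgt, htklen, hff, if_neg (show ¬((st : Int) + (j : Int) = -1) by omega)]
        rw [show (st : Int) + (j : Int) = ((st + j : Nat) : Int) by push_cast; ring]
        exact pvTail s st (st + j) cc hcc (by omega) (by omega)
      · have hsplit2 : List.splitOnP (fun x => x == ',') (List.drop st s) = [List.drop st s] :=
          pvSplit_no_comma _ hc
        have htgt : segs[N]?.getD [] = List.drop st s := by
          rw [hNth, hsplit2]; rfl
        have hlen_u : (List.drop st s).length = s.length - st := by simp
        have hff : PySem.Chars.findFrom s [','] ((st : Nat) : Int) none = -1 := by
          rw [PySem.Chars.findFrom_natCast s [','] st e2, if_pos]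
          rw [PySem.Chars.find_eq_neg_one_iff, List.singleton_infix_iff]
          exact hc
        rw [htgt, hlen_u, hff, if_pos rfl]
        rw [show (st : Int) + ((s.length - st : Nat) : Int) = ((s.length : Nat) : Int) by omega]
        exact pvTail s st s.length cc hcc (by omega) (le_refl _)
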